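-- pv_equiv track=rewrite | github.com/ultraleap/Element | PyElement/PyElement.py | iterate_subexpr
-- ===== SOURCE A (Python) =====
-- def iterate_subexpr(expr):
--     for i in range(0, len(expr)):
--         if expr[i] == '(':
--             depth = 0
--             for j in range(i, len(expr)):
--                 if expr[j] == '(':
--                     depth += 1
--                 elif expr[j] == ')':
--                     depth -= 1
--                 if depth == 0:
--                     yield expr[i+1:j]
--                     break
-- ===== SOURCE B (Python) =====
-- def iterate_subexpr(expr):
--     n = len(expr)
--     ms = [-1] * n
--     stack = []
--     for j in range(n):
--         c = expr[j]
--         if c == '(':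
--             stack.append(j)
--         elif c == ')':
--             if stack:
--                 ms[stack.pop()] = j
--     for i in range(n):
--         if ms[i] != -1:
--             yield expr[i+1:ms[i]]
-- ===== Notes on version B (the rewrite author's own statement) =====
-- stated objective: alternative
-- what changed: Replaces the per-'(' forward rescan (for every open paren A walks ahead counting depth to find its match) by a single stack pass that records every matching close index once, then emits the slices in order of the opening index.
import Mathlib
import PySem

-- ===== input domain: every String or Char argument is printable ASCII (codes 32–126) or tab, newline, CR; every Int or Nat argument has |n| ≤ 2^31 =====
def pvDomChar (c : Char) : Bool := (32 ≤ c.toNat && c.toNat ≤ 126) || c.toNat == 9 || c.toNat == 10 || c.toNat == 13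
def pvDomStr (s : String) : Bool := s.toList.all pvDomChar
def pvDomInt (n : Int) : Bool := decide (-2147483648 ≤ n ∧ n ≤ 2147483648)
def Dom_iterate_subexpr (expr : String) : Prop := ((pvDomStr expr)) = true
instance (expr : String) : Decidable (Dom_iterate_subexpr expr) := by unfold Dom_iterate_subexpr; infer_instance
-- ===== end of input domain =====

-- B replaces A's per-'(' forward rescan by one stack pass that precomputes every matching
-- close index, then yields the same slices in order of the opening index (objective: alternative).

-- ===== PORT A =====
-- A's inner loop 'for j in range(i, len(expr))' with its running depth and break:
-- recursion over the remaining characters (rest = expr[j:]), same depth updates, same break test.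
def pvInnerA (j : Nat) (depth : Int) (rest : List Char) : Option Nat :=
  match rest with
  | [] => none
  | c :: r =>
    let d := if c = '(' then depth + 1 else if c = ')' then depth - 1 else depth
    if d = 0 then some j else pvInnerA (j + 1) d r

-- the slice expr[i+1:j] with 0 ≤ i+1 ≤ j ≤ len is exactly drop/take on the char list
def iterate_subexpr (expr : String) : List String :=
  let l := expr.toList
  (List.range l.length).foldl (fun acc i =>
    if l.getD i ' ' = '(' then
      match pvInnerA i 0 (l.drop i) with
      | some j => acc ++ [String.ofList ((l.drop (i + 1)).take (j - (i + 1)))]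
      | none => acc
    else acc) []

-- ===== PORT B =====
-- Source B's first loop: stack of open indices (the Python list used as a stack: append = cons,
-- pop = head), ms[i] = matching close index or -1.
def pvRunMatch (rest : List Char) (j : Nat) (stack : List Nat) (ms : List Int) : List Int :=
  match rest with
  | [] => ms
  | c :: r =>
    if c = '(' then pvRunMatch r (j + 1) (j :: stack) ms
    else if c = ')' then
      match stack with
      | [] => pvRunMatch r (j + 1) [] ms
      | i0 :: s => pvRunMatch r (j + 1) s (ms.set i0 (Int.ofNat j))
    else pvRunMatch r (j + 1) stack ms

def iterate_subexpr_alt (expr : String) : List String :=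
  let l := expr.toList
  let ms := pvRunMatch l 0 [] (List.replicate l.length (-1))
  (List.range l.length).foldl (fun acc i =>
    if ms.getD i (-1) ≠ -1 then
      acc ++ [String.ofList ((l.drop (i + 1)).take ((ms.getD i (-1)).toNat - (i + 1)))]
    else acc) []

-- ===== PRECONDITION & SPEC =====
def Spec_iterate_subexpr (expr : String) (out : List String) : Prop := out = iterate_subexpr_alt expr
instance (expr : String) (out : List String) : Decidable (Spec_iterate_subexpr expr out) := by unfold Spec_iterate_subexpr; infer_instance

-- ===== CLAIM (what is proved, stated in full; the proofs are below) =====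
def Claim_equal_iterate_subexpr : Prop := ∀ (expr : String), Dom_iterate_subexpr expr → Spec_iterate_subexpr expr (iterate_subexpr expr)

-- ===== LEMMAS AND PROOFS =====

-- value of an optional close position, defaulting like Source B's -1 entries
def pvVal (o : Option Nat) (d : Int) : Int := o.elim d (fun q => (q : Int))

theorem pvInnerA_open (j : Nat) (d : Int) (r : List Char) :
    pvInnerA j d ('(' :: r) = if d + 1 = 0 then some j else pvInnerA (j + 1) (d + 1) r := by
  simp [pvInnerA]

theorem pvInnerA_close (j : Nat) (d : Int) (r : List Char) :
    pvInnerA j d (')' :: r) = if d - 1 = 0 then some j else pvInnerA (j + 1) (d - 1) r := by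
  simp [pvInnerA]

theorem pvInnerA_other (j : Nat) (d : Int) (c : Char) (r : List Char)
    (hc : ¬ c = '(') (hc' : ¬ c = ')') :
    pvInnerA j d (c :: r) = if d = 0 then some j else pvInnerA (j + 1) d r := by
  simp [pvInnerA, hc, hc']

-- Characterization of the stack pass: after processing 'rest' (absolute position j, open-paren
-- stack 'stack', partial match array 'ms'), the entry at i is: the close position computed by A's
-- inner scan from j at depth (stack position + 1) if i is on the stack; A's inner scan from i if
-- i is an un-pushed '(' inside rest; the old entry otherwise.
theorem pvRunMatch_getD (rest : List Char) : ∀ (j : Nat) (stack : List Nat) (ms : List Int) (i : Nat),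
    (∀ x ∈ stack, x < j) → stack.Nodup → j + rest.length ≤ ms.length →
    (pvRunMatch rest j stack ms).getD i (-1) =
      if i ∈ stack then
        pvVal (pvInnerA j ((stack.idxOf i : Int) + 1) rest) (ms.getD i (-1))
      else if j ≤ i ∧ rest.getD (i - j) ' ' = '(' then
        pvVal (pvInnerA i 0 (rest.drop (i - j))) (ms.getD i (-1))
      else ms.getD i (-1) := by
  induction rest with
  | nil =>
    intro j stack ms i h1 h2 h3
    simp only [pvRunMatch]
    split_ifs with hs hp
    · simp [pvInnerA, pvVal]
    · simp at hp
    · rfl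
  | cons c r ih =>
    intro j stack ms i h1 h2 h3
    simp only [List.length_cons] at h3
    by_cases hc : c = '('
    · subst hc
      rw [show pvRunMatch ('(' :: r) j stack ms = pvRunMatch r (j + 1) (j :: stack) ms from by
            simp [pvRunMatch]]
      rw [ih (j + 1) (j :: stack) ms i
            (by
              intro x hx
              cases List.mem_cons.mp hx with
              | inl h => omega
              | inr h => exact Nat.lt_succ_of_lt (h1 x h))
            (List.nodup_cons.mpr ⟨fun h => absurd (h1 j h) (lt_irrefl j), h2⟩)
            (by omega)]
      by_cases hij : i = j
      · subst hij
        have hnot : i ∉ stack := fun h => absurd (h1 i h) (lt_irrefl i)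
        rw [if_pos List.mem_cons_self, if_neg hnot, List.idxOf_cons_self,
            if_pos ⟨le_refl i, by simp⟩]
        have e0 : i - i = 0 := by omega
        rw [e0, List.drop_zero, pvInnerA_open, if_neg (by norm_num)]
        norm_num
      · by_cases hstk : i ∈ stack
        · rw [if_pos (List.mem_cons.mpr (Or.inr hstk)), if_pos hstk,
              List.idxOf_cons_ne _ (fun h : j = i => hij h.symm),
              pvInnerA_open, if_neg (by omega)]
          have e : ((stack.idxOf i : Int) + 1) + 1 = ((stack.idxOf i + 1 : Nat) : Int) + 1 := by
            push_cast; ring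
          rw [e]
        · have hnot : i ∉ j :: stack := by simp [hij, hstk]
          rw [if_neg hnot, if_neg hstk]
          by_cases hge : j + 1 ≤ i
          · have e1 : i - j = (i - (j + 1)) + 1 := by omega
            have e2 : ('(' :: r).getD (i - j) ' ' = r.getD (i - (j + 1)) ' ' := by
              rw [e1, List.getD_cons_succ]
            have e3 : ('(' :: r).drop (i - j) = r.drop (i - (j + 1)) := by
              rw [e1, List.drop_succ_cons]
            rw [e2, e3]
            by_cases hp : r.getD (i - (j + 1)) ' ' = '('
            · rw [if_pos ⟨hge, hp⟩, if_pos ⟨Nat.le_of_succ_le hge, hp⟩]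
            · rw [if_neg (fun h => hp h.2), if_neg (fun h => hp h.2)]
          · have h4 : ¬ j ≤ i := by omega
            rw [if_neg (fun h => hge h.1), if_neg (fun h => h4 h.1)]
    · by_cases hc' : c = ')'
      · subst hc'
        match stack, h1, h2 with
        | [], h1, h2 =>
          rw [show pvRunMatch (')' :: r) j [] ms = pvRunMatch r (j + 1) [] ms from by
                simp [pvRunMatch]]
          rw [ih (j + 1) [] ms i (by simp) (by simp) (by omega)]
          rw [if_neg List.not_mem_nil, if_neg List.not_mem_nil]
          by_cases hge : j + 1 ≤ i
          · have e1 : i - j = (i - (j + 1)) + 1 := by omega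
            have e2 : (')' :: r).getD (i - j) ' ' = r.getD (i - (j + 1)) ' ' := by
              rw [e1, List.getD_cons_succ]
            have e3 : (')' :: r).drop (i - j) = r.drop (i - (j + 1)) := by
              rw [e1, List.drop_succ_cons]
            rw [e2, e3]
            by_cases hp : r.getD (i - (j + 1)) ' ' = '('
            · rw [if_pos ⟨hge, hp⟩, if_pos ⟨Nat.le_of_succ_le hge, hp⟩]
            · rw [if_neg (fun h => hp h.2), if_neg (fun h => hp h.2)]
          · have hB : ¬ (j ≤ i ∧ (')' :: r).getD (i - j) ' ' = '(') := by
              rintro ⟨hji, hp⟩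
              have hij : i = j := by omega
              subst hij
              rw [Nat.sub_self] at hp
              simp at hp
            rw [if_neg (fun h => hge h.1), if_neg hB]
        | i0 :: s, h1, h2 =>
          rw [show pvRunMatch (')' :: r) j (i0 :: s) ms
                = pvRunMatch r (j + 1) s (ms.set i0 (Int.ofNat j)) from by
                simp [pvRunMatch]]
          have hi0j : i0 < j := h1 i0 List.mem_cons_self
          have hi0len : i0 < ms.length := by omega
          have hnodup := List.nodup_cons.mp h2
          rw [ih (j + 1) s (ms.set i0 (Int.ofNat j)) i
                (fun x hx => Nat.lt_succ_of_lt (h1 x (List.mem_cons.mpr (Or.inr hx))))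
                hnodup.2 (by simp only [List.length_set]; omega)]
          by_cases hii0 : i = i0
          · subst hii0
            rw [if_neg hnodup.1, if_neg (fun h => absurd h.1 (by omega)),
                if_pos List.mem_cons_self, List.idxOf_cons_self,
                pvInnerA_close, if_pos (by norm_num)]
            simp [pvVal, List.getD, hi0len]
          · have hset : (ms.set i0 (Int.ofNat j)).getD i (-1) = ms.getD i (-1) := by
              simp only [List.getD]
              rw [List.getElem?_set_ne (by omega)]
            by_cases hstk : i ∈ s
            · rw [if_pos hstk, if_pos (List.mem_cons.mpr (Or.inr hstk)),
                  List.idxOf_cons_ne _ (fun h : i0 = i => hii0 h.symm),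
                  pvInnerA_close, if_neg (by push_cast; omega), hset]
              have e : ((s.idxOf i + 1 : Nat) : Int) + 1 - 1 = (s.idxOf i : Int) + 1 := by
                push_cast; ring
              rw [e]
            · have hnot : i ∉ i0 :: s := by simp [hii0, hstk]
              rw [if_neg hstk, if_neg hnot]
              by_cases hge : j + 1 ≤ i
              · have e1 : i - j = (i - (j + 1)) + 1 := by omega
                have e2 : (')' :: r).getD (i - j) ' ' = r.getD (i - (j + 1)) ' ' := by
                  rw [e1, List.getD_cons_succ]
                have e3 : (')' :: r).drop (i - j) = r.drop (i - (j + 1)) := by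
                  rw [e1, List.drop_succ_cons]
                rw [e2, e3]
                by_cases hp : r.getD (i - (j + 1)) ' ' = '('
                · rw [if_pos ⟨hge, hp⟩, if_pos ⟨Nat.le_of_succ_le hge, hp⟩, hset]
                · rw [if_neg (fun h => hp h.2), if_neg (fun h => hp h.2), hset]
              · have hB : ¬ (j ≤ i ∧ (')' :: r).getD (i - j) ' ' = '(') := by
                  rintro ⟨hji, hp⟩
                  have hij : i = j := by omega
                  subst hij
                  rw [Nat.sub_self] at hp
                  simp at hp
                rw [if_neg (fun h => hge h.1), if_neg hB, hset]
      · rw [show pvRunMatch (c :: r) j stack ms = pvRunMatch r (j + 1) stack ms from by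
              simp [pvRunMatch, hc, hc']]
        rw [ih (j + 1) stack ms i (fun x hx => Nat.lt_succ_of_lt (h1 x hx)) h2 (by omega)]
        by_cases hstk : i ∈ stack
        · rw [if_pos hstk, if_pos hstk, pvInnerA_other _ _ _ _ hc hc',
              if_neg (by omega)]
        · rw [if_neg hstk, if_neg hstk]
          by_cases hge : j + 1 ≤ i
          · have e1 : i - j = (i - (j + 1)) + 1 := by omega
            have e2 : (c :: r).getD (i - j) ' ' = r.getD (i - (j + 1)) ' ' := by
              rw [e1, List.getD_cons_succ]
            have e3 : (c :: r).drop (i - j) = r.drop (i - (j + 1)) := by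
              rw [e1, List.drop_succ_cons]
            rw [e2, e3]
            by_cases hp : r.getD (i - (j + 1)) ' ' = '('
            · rw [if_pos ⟨hge, hp⟩, if_pos ⟨Nat.le_of_succ_le hge, hp⟩]
            · rw [if_neg (fun h => hp h.2), if_neg (fun h => hp h.2)]
          · have hB : ¬ (j ≤ i ∧ (c :: r).getD (i - j) ' ' = '(') := by
              rintro ⟨hji, hp⟩
              have hij : i = j := by omega
              subst hij
              rw [Nat.sub_self] at hp
              simp at hp
              exact hc hp
            rw [if_neg (fun h => hge h.1), if_neg hB]

theorem ms_spec (l : List Char) (i : Nat) :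
    (pvRunMatch l 0 [] (List.replicate l.length (-1))).getD i (-1) =
      if l.getD i ' ' = '(' then pvVal (pvInnerA i 0 (l.drop i)) (-1) else -1 := by
  rw [pvRunMatch_getD l 0 [] (List.replicate l.length (-1)) i (by simp) (by simp)
        (by simp)]
  have hrep : (List.replicate l.length (-1 : Int)).getD i (-1) = -1 := by
    simp [List.getD]
  rw [if_neg List.not_mem_nil, hrep]
  simp only [Nat.sub_zero, Nat.zero_le, true_and]

-- ===== VERDICT (by name: the statement is the Claim_ definition above) =====
theorem iterate_subexpr_spec : Claim_equal_iterate_subexpr := by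
  intro expr _
  unfold Spec_iterate_subexpr iterate_subexpr iterate_subexpr_alt
  apply Eq.symm
  apply PySem.List.foldl_congr_mem
  intro acc i _hi
  rw [ms_spec expr.toList i]
  by_cases hpar : expr.toList.getD i ' ' = '('
  · rw [if_pos hpar, if_pos hpar]
    cases h : pvInnerA i 0 (expr.toList.drop i) with
    | none => simp [pvVal]
    | some q => simp [pvVal]
  · rw [if_neg hpar]
    rw [if_neg hpar]
    simp
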